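-- pv_equiv track=rewrite | github.com/RohanAnandPandit/Haskell-Evaluator | src/String_Formatting.py | removeUnwantedSpaces
-- ===== SOURCE A (Python) =====
-- def removeUnwantedSpaces(exp):
--     exp = list(exp)
--     i = 0
--     prev = ""
--     l = len(exp)
--     while (i < l):
--         current = exp[i]
--         if (current == " " and prev in [" ", ',']):
--             del exp[i]
--             l -= 1
--             pass
--         else:
--             prev = current
--             i += 1
--     return "".join(exp)
-- ===== SOURCE B (Python) =====
-- def removeUnwantedSpaces(exp):
--     # Stateless pairwise filter: keep each char unless it is a space
--     # immediately preceded (in the original string) by a space or comma.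
--     return ''.join(c for p, c in zip('\x00' + exp, exp)
--                    if not (c == ' ' and p in (' ', ',')))
-- ===== Notes on version B (the rewrite author's own statement) =====
-- stated objective: simpler
-- what changed: A's stateful index loop that deletes characters in place is replaced by a stateless one-pass filter: zip the string with itself shifted by one and keep each character unless it is a space whose original predecessor is a space or comma.
import Mathlib
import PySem

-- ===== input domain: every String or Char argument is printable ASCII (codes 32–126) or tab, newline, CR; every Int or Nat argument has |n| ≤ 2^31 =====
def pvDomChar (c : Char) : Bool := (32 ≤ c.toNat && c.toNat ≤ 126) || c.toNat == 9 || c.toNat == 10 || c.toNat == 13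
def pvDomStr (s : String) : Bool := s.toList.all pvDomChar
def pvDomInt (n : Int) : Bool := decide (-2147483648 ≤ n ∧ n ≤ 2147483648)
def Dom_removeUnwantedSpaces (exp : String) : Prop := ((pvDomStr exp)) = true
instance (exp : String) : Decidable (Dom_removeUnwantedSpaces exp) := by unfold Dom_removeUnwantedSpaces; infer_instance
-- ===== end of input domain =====

-- B replaces A's in-place deletion loop with a stateless pairwise (zip) filter; objective: simpler.


-- ===== PORT A =====
-- A's while loop over the char list: deleting exp[i] keeps i (recurse on the rest with
-- the same prev); otherwise prev := current and i += 1. prev is a Python string ("" at start).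
def removeUnwantedSpacesLoopA (prev : String) : List Char → List Char
  | [] => []
  | c :: rest =>
    if String.ofList [c] = " " ∧ (prev = " " ∨ prev = ",") then
      removeUnwantedSpacesLoopA prev rest
    else
      c :: removeUnwantedSpacesLoopA (String.ofList [c]) rest

def removeUnwantedSpaces (exp : String) : String :=
  String.ofList (removeUnwantedSpacesLoopA "" exp.toList)

-- ===== PORT B =====
-- B: zip the string with itself shifted by a '\x00' sentinel, keep a char unless it is a
-- space whose original predecessor is a space or comma.
def removeUnwantedSpaces_alt (exp : String) : String :=
  String.ofList ((((Char.ofNat 0 :: exp.toList).zip exp.toList).filter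
    (fun pc => !(pc.2 == ' ' && (pc.1 == ' ' || pc.1 == ',')))).map (·.2))

-- ===== PRECONDITION & SPEC =====
def Spec_removeUnwantedSpaces (exp : String) (out : String) : Prop := out = removeUnwantedSpaces_alt exp
instance (exp : String) (out : String) : Decidable (Spec_removeUnwantedSpaces exp out) := by unfold Spec_removeUnwantedSpaces; infer_instance

-- ===== CLAIM (what is proved, stated in full; the proofs are below) =====
def Claim_equal_removeUnwantedSpaces : Prop := ∀ (exp : String), Dom_removeUnwantedSpaces exp → Spec_removeUnwantedSpaces exp (removeUnwantedSpaces exp)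

-- ===== LEMMAS AND PROOFS =====

-- B's core as a function of the previous character, for the induction.
def pvZF (p : Char) (l : List Char) : List Char :=
  (((p :: l).zip l).filter
    (fun pc => !(pc.2 == ' ' && (pc.1 == ' ' || pc.1 == ',')))).map (·.2)

theorem pvZF_nil (p : Char) : pvZF p [] = [] := rfl

theorem pvZF_cons (p c : Char) (rest : List Char) :
    pvZF p (c :: rest) =
      (if (c == ' ' && (p == ' ' || p == ',')) = true then [] else [c]) ++ pvZF c rest := by
  simp only [pvZF, List.zip_cons_cons, List.filter_cons]
  cases hb : (c == ' ' && (p == ' ' || p == ','))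
  · simp
  · simp

theorem pvOfList_eq_space {c : Char} (h : String.ofList [c] = " ") : c = ' ' := by
  have := congrArg String.toList h
  simpa using this

theorem pvOfList_eq_comma {c : Char} (h : String.ofList [c] = ",") : c = ',' := by
  have := congrArg String.toList h
  simpa using this

-- The loop invariant: A's retained prev and B's literal predecessor agree on whether
-- they are a space-or-comma, and then the two scans emit the same characters.
theorem pvLoop_eq_zf (l : List Char) (prev : String) (q : Char)
    (h : (prev = " " ∨ prev = ",") ↔ (q = ' ' ∨ q = ',')) :
    removeUnwantedSpacesLoopA prev l = pvZF q l := by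
  induction l generalizing prev q with
  | nil => rw [removeUnwantedSpacesLoopA, pvZF_nil]
  | cons c rest ih =>
    rw [pvZF_cons, removeUnwantedSpacesLoopA]
    by_cases hc : String.ofList [c] = " " ∧ (prev = " " ∨ prev = ",")
    · have hcEq : c = ' ' := pvOfList_eq_space hc.1
      subst hcEq
      have hq : q = ' ' ∨ q = ',' := h.mp hc.2
      have hb : ((' ' == ' ') && (q == ' ' || q == ',')) = true := by
        rcases hq with hq | hq <;> subst hq <;> rfl
      rw [if_pos hc, if_pos hb, List.nil_append]
      exact ih prev ' ' ⟨fun _ => Or.inl rfl, fun _ => hc.2⟩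
    · rw [if_neg hc]
      have hb : (c == ' ' && (q == ' ' || q == ',')) = false := by
        by_cases hc1 : c = ' '
        · subst hc1
          have hsp : ¬ (prev = " " ∨ prev = ",") := fun hp => hc ⟨by decide, hp⟩
          have hsq : ¬ (q = ' ' ∨ q = ',') := fun hq => hsp (h.mpr hq)
          rw [not_or] at hsq
          simp [hsq.1, hsq.2]
        · simp [hc1]
      rw [hb, if_neg (by simp), List.cons_append, List.nil_append]
      have hiff : (String.ofList [c] = " " ∨ String.ofList [c] = ",") ↔ (c = ' ' ∨ c = ',') := by
        constructor
        · rintro (h1 | h1)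
          · exact Or.inl (pvOfList_eq_space h1)
          · exact Or.inr (pvOfList_eq_comma h1)
        · rintro (h1 | h1) <;> subst h1
          · exact Or.inl rfl
          · exact Or.inr rfl
      rw [ih (String.ofList [c]) c hiff]

-- ===== VERDICT (by name: the statement is the Claim_ definition above) =====
theorem removeUnwantedSpaces_spec : Claim_equal_removeUnwantedSpaces := by
  intro exp _
  show removeUnwantedSpaces exp = removeUnwantedSpaces_alt exp
  unfold removeUnwantedSpaces removeUnwantedSpaces_alt
  rw [pvLoop_eq_zf exp.toList "" (Char.ofNat 0)
    ⟨fun hp => by rcases hp with hp | hp <;> exact absurd (congrArg String.length hp) (by decide),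
     fun hq => by rcases hq with hq | hq <;> exact absurd hq (by decide)⟩]
  rfl
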